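-- pv_equiv track=rewrite | github.com/vsedov/Fun_Scripts | chapter_1/NameGen/poormansbarchart.py | better_method
-- ===== SOURCE A (Python) =====
-- import string
-- from collections import defaultdict
--
-- def better_method(sentence: str) -> dict:
--     alphabet = string.ascii_lowercase
--     # Defaultdict module allows you to build  dictionary keys very fast
--     # TODO: research on defaultdict() and how that can be used to make code
--     # better
--     mapped = defaultdict(list)
--
--     for characters in sentence:
--         character = characters.lower()
--         if character in alphabet:
--             mapped[characters].append(characters)
--
--     return mapped
-- ===== SOURCE B (Python) =====
-- import string
-- from collections import defaultdict, Counter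
--
-- def better_method(sentence: str) -> dict:
--     # Pass 1: count each letter-character (first-occurrence order preserved by Counter).
--     counts = Counter(ch for ch in sentence if ch.lower() in string.ascii_lowercase)
--     # Pass 2: build each group in one shot as [ch] * count.
--     mapped = defaultdict(list)
--     for ch, n in counts.items():
--         mapped[ch] = [ch] * n
--     return mapped
-- ===== Notes on version B (the rewrite author's own statement) =====
-- stated objective: alternative
-- what changed: Replaces the per-occurrence defaultdict-append loop by a two-pass count-then-construct: a Counter over the filtered characters, then each group built in one shot as [ch] * count.
import Mathlib
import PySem

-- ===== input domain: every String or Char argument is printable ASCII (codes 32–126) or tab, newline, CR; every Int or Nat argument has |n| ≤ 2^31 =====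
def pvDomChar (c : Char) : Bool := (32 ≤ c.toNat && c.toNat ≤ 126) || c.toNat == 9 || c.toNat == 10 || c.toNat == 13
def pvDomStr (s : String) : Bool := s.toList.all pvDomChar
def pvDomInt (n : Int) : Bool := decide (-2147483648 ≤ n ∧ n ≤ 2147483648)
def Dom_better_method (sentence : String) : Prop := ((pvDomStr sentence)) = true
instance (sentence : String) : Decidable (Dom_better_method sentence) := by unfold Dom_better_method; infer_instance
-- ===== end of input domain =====

-- B groups letters by count-then-construct (Counter, then [ch]*count) instead of A's per-occurrence append; alternative decomposition, same cost.

-- string.ascii_lowercase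
def pvAlphabet : List Char := "abcdefghijklmnopqrstuvwxyz".toList

-- ===== PORT A =====
-- for characters in sentence: if characters.lower() in alphabet: mapped[characters].append(characters)
def better_method (sentence : String) : List (String × List String) :=
  (sentence.toList.foldl
    (fun d c =>
      if PySem.Chars.lowerChar c ∈ pvAlphabet then
        PySem.Dict.modify d (String.singleton c) [] (· ++ [String.singleton c])
      else d)
    PySem.Dict.empty).items

-- ===== PORT B =====
-- counts = Counter(ch for ch in sentence if ch.lower() in ascii_lowercase);
-- for ch, n in counts.items(): mapped[ch] = [ch] * n
def better_method_alt (sentence : String) : List (String × List String) :=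
  ((PySem.Dict.counter
      ((sentence.toList.filter (fun c => PySem.Chars.lowerChar c ∈ pvAlphabet)).map String.singleton)).items.foldl
    (fun d p => PySem.Dict.insert d p.1 (List.replicate p.2.toNat p.1))
    PySem.Dict.empty).items

-- ===== PRECONDITION & SPEC =====
def Spec_better_method (sentence : String) (out : List (String × List String)) : Prop := out = better_method_alt sentence
instance (sentence : String) (out : List (String × List String)) : Decidable (Spec_better_method sentence out) := by unfold Spec_better_method; infer_instance

-- ===== CLAIM (what is proved, stated in full; the proofs are below) =====
def Claim_equal_better_method : Prop := ∀ (sentence : String), Dom_better_method sentence → Spec_better_method sentence (better_method sentence)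

-- ===== LEMMAS AND PROOFS =====

-- a fold whose step acts only when p holds is a fold over the filtered list
theorem pv_foldl_if_filter {α β : Type} (p : α → Prop) [DecidablePred p]
    (g : β → α → β) (l : List α) (d : β) :
    l.foldl (fun d c => if p c then g d c else d) d = (l.filter (fun c => decide (p c))).foldl g d := by
  induction l generalizing d with
  | nil => rfl
  | cons x xs ih =>
    by_cases h : p x <;> simp [h, ih]

theorem pv_filter_map_pair {κ : Type} [DecidableEq κ] (l : List κ) (c : κ) :
    (((l.map (fun k => (k, k))).filter (fun p => p.1 == c)).map (·.2)) = List.replicate (l.count c) c := by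
  induction l with
  | nil => rfl
  | cons x xs ih =>
    by_cases h : x = c
    · subst h; simp [ih, List.replicate_succ]
    · simp [h, ih]

-- the per-key append loop and the count-then-construct loop build dicts with the same items
theorem pv_group_eq (l : List String) :
    (l.foldl (fun d k => PySem.Dict.modify d k [] (· ++ [k])) PySem.Dict.empty).items
      = ((PySem.Dict.counter l).items.foldl
          (fun d p => PySem.Dict.insert d p.1 (List.replicate p.2.toNat p.1))
          PySem.Dict.empty).items := by
  have hkeys : (l.foldl (fun d k => PySem.Dict.modify d k [] (· ++ [k])) PySem.Dict.empty).keys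
      = PySem.Set.ofList l := by
    have := PySem.Dict.keys_foldl_modify (l := l) (d0 := ([] : List String))
      (f := fun d k => (· ++ [k])) (d := (PySem.Dict.empty : PySem.Dict String (List String)))
    simpa [PySem.Dict.keys_empty, PySem.Set.update_nil_left] using this
  have hnd : (l.foldl (fun d k => PySem.Dict.modify d k [] (· ++ [k])) PySem.Dict.empty).keys.Nodup :=
    hkeys ▸ PySem.Set.nodup_ofList l
  have hval : ∀ c : String,
      (l.foldl (fun d k => PySem.Dict.modify d k [] (· ++ [k])) PySem.Dict.empty).getD c []
        = List.replicate (l.count c) c := by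
    intro c
    have h := PySem.Dict.getD_foldl_modify_append (l := l.map (fun k => (k, k)))
      (d := (PySem.Dict.empty : PySem.Dict String (List String))) (c := c)
    rw [List.foldl_map] at h
    simpa [PySem.Dict.getD_empty, pv_filter_map_pair] using h
  -- B's side: fold of inserts over the counter's items (fresh, distinct keys) appends
  have hB : ((PySem.Dict.counter l).items.foldl
        (fun d p => PySem.Dict.insert d p.1 (List.replicate p.2.toNat p.1))
        PySem.Dict.empty).items
      = (PySem.Dict.counter l).items.map (fun p => (p.1, List.replicate p.2.toNat p.1)) := by
    simpa using PySem.Dict.items_foldl_insert_fresh (PySem.Dict.counter l).items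
      (fun p => p.1) (fun p => List.replicate p.2.toNat p.1) PySem.Dict.empty
      (fun a _ => PySem.Dict.contains_empty _)
      (by simpa [PySem.Dict.keys] using PySem.Dict.nodup_keys_counter l)
  rw [hB, PySem.Dict.items_counter, List.map_map,
    PySem.Dict.items_eq_map_keys _ hnd [], hkeys]
  refine List.map_congr_left ?_
  intro k _
  simp [hval k]

theorem better_method_spec : Claim_equal_better_method := by
  intro sentence _
  unfold Spec_better_method better_method better_method_alt
  rw [pv_foldl_if_filter (fun c => PySem.Chars.lowerChar c ∈ pvAlphabet)
        (fun d c => PySem.Dict.modify d (String.singleton c) [] (· ++ [String.singleton c])),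
      ← List.foldl_map (f := String.singleton)
        (g := fun d k => PySem.Dict.modify d k [] (· ++ [k])),
      pv_group_eq]
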